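-- pv_equiv track=rewrite | github.com/AlvinOctaviano16/Kelompok-5-Data-Structure | Queue/ai_solution.py | stone_pile_game
-- ===== SOURCE A (Python) =====
-- from collections import deque
--
-- def stone_pile_game(test_cases):
--     results = []
--     for N, A in test_cases:
--         dq = deque(A)
--         turn = 1
--
--         while len(dq) > 1:
--             if turn == 1:
--                 dq.append(dq.popleft())
--                 if len(dq) > 1:
--                     dq.popleft()
--             else:
--                 dq.append(dq.popleft())
--                 dq.append(dq.popleft())
--                 if len(dq) > 1:
--                     dq.popleft()
--             turn = 1 - turn
--
--         last_player = 0 if turn == 1 else 1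
--         results.append((last_player, dq[0]))
--
--     return results
-- ===== SOURCE B (Python) =====
-- def stone_pile_game(test_cases):
--     results = []
--     for N, A in test_cases:
--         L = list(A)
--         p = 0
--         turn = 1
--         while len(L) > 1:
--             skip = 1 if turn == 1 else 2
--             idx = (p + skip) % len(L)
--             del L[idx]
--             p = idx % len(L)
--             turn = 1 - turn
--         results.append((0 if turn == 1 else 1, L[0]))
--     return results
-- ===== Notes on version B (the rewrite author's own statement) =====
-- stated objective: alternative
-- what changed: Replaces the deque rotate-and-popleft simulation with a plain list kept in original order plus an integer front pointer: each elimination is one modular index computation and one deletion, no element rotation.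
import Mathlib
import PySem

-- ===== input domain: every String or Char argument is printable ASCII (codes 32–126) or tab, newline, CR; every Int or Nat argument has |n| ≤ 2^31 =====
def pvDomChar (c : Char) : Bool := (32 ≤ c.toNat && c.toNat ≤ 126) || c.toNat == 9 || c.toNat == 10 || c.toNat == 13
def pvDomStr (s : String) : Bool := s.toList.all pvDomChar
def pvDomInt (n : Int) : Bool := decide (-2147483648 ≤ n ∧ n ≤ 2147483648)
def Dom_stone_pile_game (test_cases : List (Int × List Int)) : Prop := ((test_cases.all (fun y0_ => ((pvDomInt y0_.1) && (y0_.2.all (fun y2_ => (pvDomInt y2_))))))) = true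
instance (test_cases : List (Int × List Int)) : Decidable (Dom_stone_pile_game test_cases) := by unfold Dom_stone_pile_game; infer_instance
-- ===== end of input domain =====

-- B replaces A's deque rotations with a plain list and a modular index pointer (same cost, different data structure); equivalence proved for test cases whose pile lists are nonempty (A raises IndexError on an empty pile).

-- ===== PORT A =====
-- dq.append(dq.popleft()) on a nonempty deque: move front to back
def pvRot (dq : List Int) : List Int :=
  match dq with
  | [] => []
  | x :: rest => rest ++ [x]

theorem pvRot_length (l : List Int) : (pvRot l).length = l.length := by
  cases l <;> simp [pvRot]

-- A's while-loop: returns the final deque and the final turn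
def pvLoopA (dq : List Int) (turn : Int) : List Int × Int :=
  if dq.length > 1 then
    if turn == 1 then
      let dq1 := pvRot dq
      let dq2 := if dq1.length > 1 then dq1.tail else dq1
      pvLoopA dq2 (1 - turn)
    else
      let dq1 := pvRot (pvRot dq)
      let dq2 := if dq1.length > 1 then dq1.tail else dq1
      pvLoopA dq2 (1 - turn)
  else (dq, turn)
termination_by dq.length
decreasing_by
  · simp only [pvRot_length]; split <;> simp_all [List.length_tail, pvRot_length] <;> omega
  · simp only [pvRot_length]; split <;> simp_all [List.length_tail, pvRot_length] <;> omega

def stone_pile_game (test_cases : List (Int × List Int)) : List (Int × Int) :=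
  test_cases.foldl (fun results c =>
    let r := pvLoopA c.2 1
    let last_player : Int := if r.2 == 1 then 0 else 1
    results ++ [(last_player, (PySem.List.pyGet? r.1 0).getD 0)]) []

-- ===== PORT B =====
-- B's while-loop: list L, pointer p (current front), turn
def pvLoopB (L : List Int) (p : Nat) (turn : Int) : List Int × Nat × Int :=
  if L.length > 1 then
    let skip : Nat := if turn == 1 then 1 else 2
    let idx := (p + skip) % L.length
    let L' := L.eraseIdx idx
    pvLoopB L' (idx % L'.length) (1 - turn)
  else (L, p, turn)
termination_by L.length
decreasing_by
  have h0 : 0 < L.length := by omega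
  have h2 : ∀ x : Nat, x % L.length < L.length := fun x => Nat.mod_lt x h0
  simp only [List.length_eraseIdx, h2, if_true]
  omega

def stone_pile_game_alt (test_cases : List (Int × List Int)) : List (Int × Int) :=
  test_cases.foldl (fun results c =>
    let r := pvLoopB c.2 0 1
    results ++ [((if r.2.2 == 1 then 0 else 1 : Int), (PySem.List.pyGet? r.1 0).getD 0)]) []

-- ===== PRECONDITION & SPEC =====
-- Pre_ excludes test cases containing an empty pile A, on which both Pythons raise IndexError (dq[0] / L[0]).
def Pre_stone_pile_game (test_cases : List (Int × List Int)) : Prop :=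
  ∀ c ∈ test_cases, c.2 ≠ []
instance (test_cases : List (Int × List Int)) : Decidable (Pre_stone_pile_game test_cases) := by
  unfold Pre_stone_pile_game; infer_instance
def pvWitness_stone_pile_game : (List (Int × List Int)) := [(3, [5, 7, 9]), (1, [4])]

def Spec_stone_pile_game (test_cases : List (Int × List Int)) (out : List (Int × Int)) : Prop := out = stone_pile_game_alt test_cases
instance (test_cases : List (Int × List Int)) (out : List (Int × Int)) : Decidable (Spec_stone_pile_game test_cases out) := by unfold Spec_stone_pile_game; infer_instance

-- ===== CLAIM (what is proved, stated in full; the proofs are below) =====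
def Claim_equal_stone_pile_game : Prop := ∀ (test_cases : List (Int × List Int)), Dom_stone_pile_game test_cases → Pre_stone_pile_game test_cases → Spec_stone_pile_game test_cases (stone_pile_game test_cases)

-- ===== LEMMAS AND PROOFS =====

theorem pvRot_eq_rotate (l : List Int) : pvRot l = l.rotate 1 := by
  cases l with
  | nil => simp [pvRot]
  | cons x rest => simp [pvRot, List.rotate_cons_succ]

-- the crux: popping the front of the rotated deque = erasing at the modular index
theorem rotate_tail_erase (L : List Int) (idx : Nat) (hidxlt : idx < L.length) (hn : 2 ≤ L.length) :
    (L.rotate idx).tail = (L.eraseIdx idx).rotate (idx % (L.length - 1)) := by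
  have h2 : L.rotate idx = L.drop idx ++ L.take idx :=
    List.rotate_eq_drop_append_take (by omega)
  have h3 : L.drop idx = L[idx] :: L.drop (idx + 1) := List.drop_eq_getElem_cons hidxlt
  have hL : (L.rotate idx).tail = L.drop (idx + 1) ++ L.take idx := by
    rw [h2, h3, List.cons_append, List.tail_cons]
  have herase : L.eraseIdx idx = L.take idx ++ L.drop (idx + 1) :=
    List.eraseIdx_eq_take_drop_succ L idx
  by_cases hcase : idx = L.length - 1
  · -- removed the last slot: the new front is L[0]
    have hmod : idx % (L.length - 1) = 0 := by rw [hcase]; exact Nat.mod_self _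
    rw [hL, hmod, herase, hcase]
    have hd : L.drop (L.length - 1 + 1) = [] := by
      apply List.drop_eq_nil_of_le; omega
    simp [hd]
  · have hlt : idx < L.length - 1 := by omega
    have hmod : idx % (L.length - 1) = idx := Nat.mod_eq_of_lt hlt
    have htk : (L.take idx).length = idx := by
      simp [List.length_take]; omega
    have hel : (L.eraseIdx idx).length = L.length - 1 := by
      simp only [List.length_eraseIdx, if_pos hidxlt]
    rw [hL, hmod, herase]
    rw [List.rotate_eq_drop_append_take (by rw [herase] at hel; omega)]
    rw [List.drop_left' htk, List.take_left' htk]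

theorem loop_eq : ∀ (n : Nat) (L : List Int) (p : Nat) (turn : Int), L.length = n → p < L.length →
    pvLoopA (L.rotate p) turn = ((pvLoopB L p turn).1, (pvLoopB L p turn).2.2) := by
  intro n
  induction n using Nat.strong_induction_on with
  | _ n ih =>
    intro L p turn hlen hp
    by_cases h : L.length > 1
    · -- one step of each loop
      set skip : Nat := if turn == 1 then 1 else 2 with hskip
      set idx := (p + skip) % L.length with hidx
      set L' := L.eraseIdx idx with hL'
      have hrotlen : (L.rotate p).length = L.length := List.length_rotate L p
      have hel : L'.length = L.length - 1 := by
        have : idx < L.length := Nat.mod_lt _ (by omega)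
        simp [hL', List.length_eraseIdx, this]
      have hstep : ∀ s : Nat, ((L.rotate p).rotate s).tail
          = (L.eraseIdx ((p + s) % L.length)).rotate (((p + s) % L.length) % (L.length - 1)) := by
        intro s
        rw [List.rotate_rotate, ← List.rotate_mod]
        exact rotate_tail_erase L ((p + s) % L.length) (Nat.mod_lt _ (by omega)) (by omega)
      have hrec : pvLoopA ((L.rotate p).rotate skip).tail (1 - turn)
          = ((pvLoopB L' (idx % L'.length) (1 - turn)).1, (pvLoopB L' (idx % L'.length) (1 - turn)).2.2) := by
        rw [hstep skip, ← hidx, ← hL', ← hel]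
        exact ih (n - 1) (by omega) L' (idx % L'.length) (1 - turn) (by omega)
          (by rw [hel]; exact Nat.mod_lt _ (by omega))
      -- unfold one iteration of each loop
      rw [pvLoopB.eq_def]
      simp only [h, if_pos]
      rw [pvLoopA.eq_def]
      simp only [hrotlen, h, if_pos]
      by_cases ht : turn == 1
      · have hskip1 : skip = 1 := by simp [hskip, ht]
        simp only [ht, if_pos]
        have hone : pvRot (L.rotate p) = (L.rotate p).rotate 1 := pvRot_eq_rotate _
        have hlen1 : (pvRot (L.rotate p)).length = L.length := by rw [pvRot_length, hrotlen]
        simp only [hone, hlen1, h, if_pos]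
        rw [hskip1] at hrec
        simpa [hskip1, h, hidx, hL'] using hrec
      · have hskip2 : skip = 2 := by simp [hskip, ht]
        simp only [ht, if_neg, Bool.false_eq_true, not_false_iff]
        have htwo : pvRot (pvRot (L.rotate p)) = (L.rotate p).rotate 2 := by
          rw [pvRot_eq_rotate, pvRot_eq_rotate, List.rotate_rotate]
        have hlen2 : (pvRot (pvRot (L.rotate p))).length = L.length := by
          rw [pvRot_length, pvRot_length, hrotlen]
        simp only [htwo, hlen2, h, if_pos]
        rw [hskip2] at hrec
        simpa [hskip2, h, hidx, hL'] using hrec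
    · -- both loops stop: L = [a], p = 0
      have h1 : L.length = 1 := by omega
      have hp0 : p = 0 := by omega
      rw [pvLoopA.eq_def, pvLoopB.eq_def]
      have hr : (L.rotate p).length = L.length := List.length_rotate L p
      simp [h1, hp0, hr]

theorem case_eq (c : Int × List Int) (hc : c.2 ≠ []) :
    ((if (pvLoopA c.2 1).2 == 1 then (0:Int) else 1), (PySem.List.pyGet? (pvLoopA c.2 1).1 0).getD 0)
    = ((if (pvLoopB c.2 0 1).2.2 == 1 then (0:Int) else 1), (PySem.List.pyGet? (pvLoopB c.2 0 1).1 0).getD 0) := by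
  have hlen : 0 < c.2.length := List.length_pos_iff.mpr hc
  have := loop_eq c.2.length c.2 0 1 rfl hlen
  rw [List.rotate_zero] at this
  rw [this]

theorem foldl_eq (tcs : List (Int × List Int)) (hpre : ∀ c ∈ tcs, c.2 ≠ []) :
    ∀ acc : List (Int × Int),
    tcs.foldl (fun results c =>
      let r := pvLoopA c.2 1
      let last_player : Int := if r.2 == 1 then 0 else 1
      results ++ [(last_player, (PySem.List.pyGet? r.1 0).getD 0)]) acc
    = tcs.foldl (fun results c =>
      let r := pvLoopB c.2 0 1
      results ++ [((if r.2.2 == 1 then 0 else 1 : Int), (PySem.List.pyGet? r.1 0).getD 0)]) acc := by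
  induction tcs with
  | nil => intro acc; rfl
  | cons c rest ihr =>
    intro acc
    simp only [List.foldl_cons]
    rw [case_eq c (hpre c (List.mem_cons_self))]
    exact ihr (fun d hd => hpre d (List.mem_cons_of_mem _ hd)) _

-- ===== VERDICT (by name: the statement is the Claim_ definition above) =====
theorem stone_pile_game_spec : Claim_equal_stone_pile_game := by
  intro tcs _ hpre
  unfold Spec_stone_pile_game stone_pile_game stone_pile_game_alt
  exact foldl_eq tcs hpre []
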